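-- pv_equiv track=rewrite | github.com/whyme36/synapis_recruitmen_challenge | task_3.py | add_space_from_left
-- ===== SOURCE A (Python) =====
-- def add_space_from_left(String,maximum_width):
--     #calculate how much spaces needed to compensate for the length, and how many spaces string has
--     number_of_spaces_needed = maximum_width - len(String)
--     how_many_spaces = len(String.split(' ')) - 1
--     output = ''
--     if number_of_spaces_needed <= how_many_spaces and number_of_spaces_needed!=0: #if number_of_spaces_needed is smaler then spaces in string and it's not 0
--         String_splited = String.split(' ', number_of_spaces_needed) #split string form the right into number_of_spaces_needed pieces
--         output = "  ".join(String_splited) #and add betwen that pieces extra speces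
--     elif how_many_spaces==0 or number_of_spaces_needed==0:
--         output=String #get back string
--     else: # when number of number_of_spaces_needed is bigger than number of spaces in string
--         spaces_count=int(number_of_spaces_needed/how_many_spaces) # find the number of spaces you can fit into each word gap and create string whit that amount
--         i=0
--         spaces=''
--         while i<=spaces_count:
--             spaces+=' '
--             i+=1
--         String_splited = String.split(' ') #
--         output = spaces.join(String_splited)
--         output=add_space_from_left(output,maximum_width)# to fit the rest needed spaces, function need go back to itselft
--
--     return output
-- ===== SOURCE B (Python) =====
-- def add_space_from_left(String, maximum_width):
--     # Two-stage closed form: widen every gap at once with divmod, then split off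
--     # the remaining gaps and double them - no recursion, no character loop.
--     need = maximum_width - len(String)
--     words = String.split(' ')
--     gaps = len(words) - 1
--     if gaps == 0 or need == 0:
--         return String
--     if need > gaps:
--         q, need = divmod(need, gaps)
--         String = (' ' * (q + 1)).join(words)
--     return '  '.join(String.split(' ', need))
-- ===== Notes on version B (the rewrite author's own statement) =====
-- stated objective: simpler
-- what changed: A recursively re-joins the string and calls itself (building the space run with a character-by-character while loop); B computes the gap widening once with divmod, joins once, and finishes with a single limited split-and-rejoin - no recursion and no character loop.
import Mathlib
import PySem

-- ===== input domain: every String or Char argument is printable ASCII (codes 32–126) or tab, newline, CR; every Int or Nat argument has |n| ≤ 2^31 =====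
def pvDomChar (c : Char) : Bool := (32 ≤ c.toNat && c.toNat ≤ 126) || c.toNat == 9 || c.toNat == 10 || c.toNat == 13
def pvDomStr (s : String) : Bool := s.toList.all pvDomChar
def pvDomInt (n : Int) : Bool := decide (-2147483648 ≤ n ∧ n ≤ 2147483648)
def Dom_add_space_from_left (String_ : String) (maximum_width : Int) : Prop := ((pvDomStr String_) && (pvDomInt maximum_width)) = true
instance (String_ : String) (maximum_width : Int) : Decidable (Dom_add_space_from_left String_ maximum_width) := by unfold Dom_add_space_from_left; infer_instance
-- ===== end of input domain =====

-- B replaces A's self-recursion and character-appending while loop by a single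
-- divmod widening pass followed by one limited split (objective: simpler).

-- ===== PORT A =====

-- A's `while i<=spaces_count: spaces+=' '; i+=1` loop, step for step
-- (fuel = remaining iterations + 1; the call site passes enough, see pv_buildSpaces_run)
def pvBuildSpaces (fuel : Nat) (spaces_count : Int) (i : Int) (spaces : List Char) : List Char :=
  match fuel with
  | 0 => spaces
  | fuel + 1 =>
    if i ≤ spaces_count then pvBuildSpaces fuel spaces_count (i + 1) (spaces ++ [' '])
    else spaces

-- literal transliteration of A (self-recursion on the string, both split-based
-- counters recomputed per call, the spaces run built by the while loop); the fuel
-- only makes the recursion total: each pass strictly shrinks maximum_width - len(String)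
-- (proved in pv_chars_eq's analysis), so the fuel passed below is never exhausted
def add_space_from_left_go (fuel : Nat) (s : List Char) (w : Int) : List Char :=
  match fuel with
  | 0 => s
  | fuel + 1 =>
    let need : Int := w - s.length
    let gaps : Int := (PySem.Chars.splitOn s [' ']).length - 1
    if need ≤ gaps ∧ need ≠ 0 then
      PySem.Chars.join [' ', ' '] (PySem.Chars.splitOnMax s [' '] need)
    else if gaps = 0 ∨ need = 0 then s
    else
      -- int(need/gaps): both operands are positive here, so float truncation = floordiv
      -- (exact on the stated |n| ≤ 2^31 domain: quotients of such ints round to floor)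
      let spaces_count := PySem.Int.floordiv need gaps
      let spaces := pvBuildSpaces (spaces_count + 1).toNat spaces_count 0 []
      add_space_from_left_go fuel (PySem.Chars.join spaces (PySem.Chars.splitOn s [' '])) w

def add_space_from_left_chars (s : List Char) (w : Int) : List Char :=
  add_space_from_left_go ((w - (s.length : Int)).toNat + 1) s w

def add_space_from_left (String_ : String) (maximum_width : Int) : String :=
  String.ofList (add_space_from_left_chars String_.toList maximum_width)

-- ===== PORT B =====

-- literal transliteration of B (one divmod widening pass, then one limited split)
def add_space_from_left_alt_chars (s : List Char) (w : Int) : List Char :=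
  let need : Int := w - s.length
  let words := PySem.Chars.splitOn s [' ']
  let gaps : Int := words.length - 1
  if gaps = 0 ∨ need = 0 then s
  else
    -- (String, need) after the optional `q, need = divmod…; String = (' '*(q+1)).join(words)`
    let p : List Char × Int :=
      if need > gaps then
        (PySem.Chars.join (List.replicate (PySem.Int.floordiv need gaps + 1).toNat ' ') words,
         PySem.Int.mod need gaps)
      else (s, need)
    PySem.Chars.join [' ', ' '] (PySem.Chars.splitOnMax p.1 [' '] p.2)

def add_space_from_left_alt (String_ : String) (maximum_width : Int) : String :=
  String.ofList (add_space_from_left_alt_chars String_.toList maximum_width)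

-- ===== PRECONDITION & SPEC =====
def Spec_add_space_from_left (String_ : String) (maximum_width : Int) (out : String) : Prop := out = add_space_from_left_alt String_ maximum_width
instance (String_ : String) (maximum_width : Int) (out : String) : Decidable (Spec_add_space_from_left String_ maximum_width out) := by unfold Spec_add_space_from_left; infer_instance

-- ===== CLAIM (what is proved, stated in full; the proofs are below) =====
def Claim_equal_add_space_from_left : Prop := ∀ (String_ : String) (maximum_width : Int), Dom_add_space_from_left String_ maximum_width → Spec_add_space_from_left String_ maximum_width (add_space_from_left String_ maximum_width)

-- ===== LEMMAS AND PROOFS =====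

theorem pv_go_split (l : List Char) : ∀ (fuel : Nat) (cur : List Char) (acc : List (List Char)),
    l.length ≤ fuel →
    PySem.Chars.splitOn.go [' '] fuel l cur acc
      = acc.reverse ++ (l.splitOn ' ').modifyHead (fun t => cur.reverse ++ t) := by
  induction l with
  | nil =>
    intro fuel cur acc _
    rw [PySem.Chars.splitOn.go.eq_def]
    cases fuel <;> simp [List.splitOn]
  | cons c rest ih =>
    intro fuel cur acc h
    cases fuel with
    | zero => simp at h
    | succ f =>
      rw [PySem.Chars.splitOn.go.eq_def]
      by_cases hc : c = ' '
      · subst hc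
        have hp : [' '].isPrefixOf (' ' :: rest) = true := by
          simp [List.isPrefixOf]
        simp only [hp, if_true, List.length_cons] at *
        have hd : List.drop (([] : List Char).length + 1) (' ' :: rest) = rest := rfl
        rw [hd, ih f [] (cur.reverse :: acc) (by simpa using h)]
        simp only [List.splitOn, List.splitOnP_cons]
        simp only [List.reverse_nil, List.nil_append, beq_self_eq_true, if_true,
          List.reverse_cons, List.append_assoc]
        cases hx : List.splitOnP (fun x => x == ' ') rest <;>
          simp [List.modifyHead]
      · have hp : [' '].isPrefixOf (c :: rest) = false := by
          simp [List.isPrefixOf]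
          exact fun hcc => absurd hcc.symm hc
        simp only [hp, Bool.false_eq_true, if_false]
        rw [ih f (c :: cur) acc (by simp at h ⊢; omega)]
        have hfun : (fun t => (c :: cur).reverse ++ t)
            = ((fun t => cur.reverse ++ t) ∘ (List.cons c)) := by
          funext t; simp
        rw [hfun, ← List.modifyHead_modifyHead]
        simp [List.splitOn, List.splitOnP_cons, hc]

theorem pv_splitOn_eq (s : List Char) : PySem.Chars.splitOn s [' '] = s.splitOn ' ' := by
  show PySem.Chars.splitOn.go [' '] (s.length + 1) s [] [] = _
  rw [pv_go_split s (s.length + 1) [] [] (by omega)]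
  cases h : List.splitOn ' ' s <;> simp [List.modifyHead]

theorem pv_length_join_gen (sep : List Char) : ∀ (ls : List (List Char)), ls ≠ [] →
    (PySem.Chars.join sep ls).length = (ls.map List.length).sum + sep.length * (ls.length - 1) := by
  intro ls
  induction ls with
  | nil => simp
  | cons a t ih =>
    intro _
    cases t with
    | nil => simp [PySem.Chars.join_singleton]
    | cons b t2 =>
      rw [PySem.Chars.join_cons_cons]
      have := ih (by simp)
      simp only [List.length_append, List.map_cons, List.sum_cons, List.length_cons] at this ⊢
      rw [this]
      simp only [Nat.add_sub_cancel]
      ring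

theorem pv_sum_splitOn (s : List Char) :
    ((s.splitOn ' ').map List.length).sum + ((s.splitOn ' ').length - 1) = s.length := by
  have h := List.intercalate_splitOn s ' '
  have h2 : (PySem.Chars.join [' '] (s.splitOn ' ')).length = s.length := by
    show ([' '].intercalate (s.splitOn ' ')).length = s.length
    rw [h]
  rw [pv_length_join_gen [' '] (s.splitOn ' ') (List.splitOnP_ne_nil _ _)] at h2
  simpa using h2

theorem pv_len_join (s : List Char) (k : Nat) :
    (PySem.Chars.join (List.replicate k ' ') (PySem.Chars.splitOn s [' '])).length
      = ((s.splitOn ' ').map List.length).sum + k * ((s.splitOn ' ').length - 1) := by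
  rw [pv_splitOn_eq,
    pv_length_join_gen (List.replicate k ' ') (List.splitOn ' ' s) (List.splitOnP_ne_nil _ _)]
  simp


theorem pv_buildSpaces_eq : ∀ (fuel : Nat) (sc i : Int) (acc : List Char),
    (sc + 1 - i).toNat ≤ fuel →
    pvBuildSpaces fuel sc i acc = acc ++ List.replicate (sc + 1 - i).toNat ' ' := by
  intro fuel
  induction fuel with
  | zero =>
    intro sc i acc h
    simp only [pvBuildSpaces]
    have hk : (sc + 1 - i).toNat = 0 := by omega
    simp [hk]
  | succ m ih =>
    intro sc i acc h
    simp only [pvBuildSpaces]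
    split_ifs with hi
    · rw [ih sc (i + 1) (acc ++ [' ']) (by omega)]
      have hk : (sc + 1 - i).toNat = (sc + 1 - (i + 1)).toNat + 1 := by omega
      rw [hk, List.replicate_succ]
      simp
    · have hk : (sc + 1 - i).toNat = 0 := by omega
      simp [hk]

theorem pv_buildSpaces_run (sc : Int) :
    pvBuildSpaces (sc + 1).toNat sc 0 [] = List.replicate (sc + 1).toNat ' ' := by
  rw [pv_buildSpaces_eq (sc + 1).toNat sc 0 [] (by omega)]
  simp

theorem pv_length_splitOn_count (l : List Char) :
    (l.splitOn ' ').length = l.count ' ' + 1 := by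
  induction l with
  | nil => simp [List.splitOn]
  | cons c rest ih =>
    simp only [List.splitOn] at ih ⊢
    rw [List.splitOnP_cons]
    by_cases hc : (c == ' ') = true
    · simp [hc, ih, List.count_cons]
    · simp [hc, ih, List.count_cons]

theorem pv_not_mem_splitOn (l : List Char) : ∀ t ∈ l.splitOn ' ', ' ' ∉ t := by
  induction l with
  | nil =>
    intro t ht
    simp [List.splitOn] at ht
    simp [ht]
  | cons c rest ih =>
    intro t ht
    by_cases hc : c = ' '
    · subst hc
      simp only [List.splitOn, List.splitOnP_cons] at ht ih
      simp at ht
      rcases ht with h | h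
      · simp [h]
      · exact ih t h
    · simp only [List.splitOn, List.splitOnP_cons] at ht ih
      have hcb : ¬ ((c == ' ') = true) := by simp [hc]
      simp only [hcb] at ht
      obtain ⟨p, ps, hps⟩ : ∃ p ps, rest.splitOnP (· == ' ') = p :: ps := by
        rcases hrest : rest.splitOnP (· == ' ') with _ | ⟨p, ps⟩
        · exact absurd hrest (List.splitOnP_ne_nil _ _)
        · exact ⟨p, ps, rfl⟩
      rw [hps] at ht
      simp only [List.modifyHead] at ht
      rcases List.mem_cons.mp ht with h | h
      · subst h
        intro hmem
        rcases List.mem_cons.mp hmem with h' | h'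
        · exact hc h'.symm
        · exact ih p (by rw [hps]; exact List.mem_cons_self ..) h'
      · exact ih t (by rw [hps]; exact List.mem_cons_of_mem _ h)

theorem pv_splitOn_len_one (s : List Char) (h : (s.splitOn ' ').length = 1) :
    s.splitOn ' ' = [s] := by
  obtain ⟨t, ht⟩ : ∃ t, s.splitOn ' ' = [t] := by
    rcases hs : s.splitOn ' ' with _ | ⟨t, ts⟩
    · exact absurd hs (List.splitOnP_ne_nil _ _)
    · rw [hs] at h; simp at h; exact ⟨t, by simp [h]⟩
  have h2 := List.intercalate_splitOn s ' '
  rw [ht] at h2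
  have h3 : [' '].intercalate [t] = t := PySem.Chars.join_singleton [' '] t
  rw [h3] at h2
  rw [ht, h2]

theorem pv_count_join (k : Nat) : ∀ (parts : List (List Char)),
    (∀ t ∈ parts, ' ' ∉ t) → parts ≠ [] →
    (PySem.Chars.join (List.replicate k ' ') parts).count ' ' = k * (parts.length - 1) := by
  intro parts
  induction parts with
  | nil => simp
  | cons a t ih =>
    intro hmem _
    cases t with
    | nil =>
      rw [PySem.Chars.join_singleton]
      simp [List.count_eq_zero.mpr (hmem a (by simp))]
    | cons b t2 =>
      rw [PySem.Chars.join_cons_cons]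
      have hrec := ih (fun u hu => hmem u (List.mem_cons_of_mem _ hu)) (by simp)
      simp only [List.count_append, hrec, List.count_replicate_self,
        List.count_eq_zero.mpr (hmem a (by simp))]
      simp only [List.length_cons, Nat.add_sub_cancel]
      ring

theorem pv_splitOnMax_neg (s : List Char) (m : Int) (h : m < 0) :
    PySem.Chars.splitOnMax s [' '] m = PySem.Chars.splitOn s [' '] := by
  rw [PySem.Chars.splitOnMax.eq_1, if_pos h]

theorem pv_splitOnMax_zero (s : List Char) :
    PySem.Chars.splitOnMax s [' '] 0 = [s] := by
  rw [PySem.Chars.splitOnMax.eq_1, if_neg (by omega)]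
  rw [PySem.Chars.splitOnMax.go.eq_def]
  cases s <;> simp

theorem pv_fdiv_facts (a b : Int) (hb : 1 ≤ b) (hab : b < a) :
    1 ≤ PySem.Int.floordiv a b ∧ 0 ≤ PySem.Int.mod a b ∧ PySem.Int.mod a b < b ∧
      b * PySem.Int.floordiv a b + PySem.Int.mod a b = a := by
  simp only [PySem.Int.floordiv, PySem.Int.mod]
  have h4 := Int.mul_fdiv_add_fmod a b
  have h2 : 0 ≤ a.fmod b := Int.fmod_nonneg (by omega) (by omega)
  have h3 : a.fmod b < b := Int.fmod_lt_of_pos a (by omega)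
  refine ⟨?_, h2, h3, h4⟩
  by_contra hq
  push Not at hq
  have h5 : b * a.fdiv b ≤ b * 0 :=
    mul_le_mul_of_nonneg_left (by omega) (by omega)
  rw [mul_zero] at h5
  omega

theorem pv_NS_len (s : List Char) (k : Nat) (hk : 1 ≤ k) :
    (PySem.Chars.join (List.replicate k ' ') (PySem.Chars.splitOn s [' '])).length
      = s.length + (k - 1) * ((s.splitOn ' ').length - 1) := by
  have h1 := pv_len_join s k
  have h2 := pv_sum_splitOn s
  have h3 : k * ((s.splitOn ' ').length - 1)
      = ((s.splitOn ' ').length - 1) + (k - 1) * ((s.splitOn ' ').length - 1) := by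
    cases k with
    | zero => omega
    | succ m =>
      rw [Nat.succ_sub_one, Nat.succ_mul]
      omega
  omega

theorem pv_NS_pieces (s : List Char) (k : Nat) :
    (PySem.Chars.splitOn (PySem.Chars.join (List.replicate k ' ') (PySem.Chars.splitOn s [' '])) [' ']).length
      = k * ((s.splitOn ' ').length - 1) + 1 := by
  rw [pv_splitOn_eq]
  rw [pv_length_splitOn_count]
  rw [pv_count_join k (PySem.Chars.splitOn s [' '])
    (by intro u hu; rw [pv_splitOn_eq] at hu; exact pv_not_mem_splitOn s u hu)
    (by rw [pv_splitOn_eq]; exact List.splitOnP_ne_nil _ _)]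
  rw [pv_splitOn_eq]

theorem pv_chars_eq (s : List Char) (w : Int) :
    add_space_from_left_chars s w = add_space_from_left_alt_chars s w := by
  have hne' : PySem.Chars.splitOn s [' '] ≠ [] := by
    rw [pv_splitOn_eq]
    exact List.splitOnP_ne_nil _ _
  have hn1 : 1 ≤ (PySem.Chars.splitOn s [' ']).length := List.length_pos_iff.mpr hne'
  simp only [add_space_from_left_chars]
  simp only [add_space_from_left_go]
  simp only [add_space_from_left_alt_chars]
  by_cases hg : ((PySem.Chars.splitOn s [' ']).length : Int) - 1 = 0 ∨ w - (s.length : Int) = 0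
  · rw [if_pos hg]
    by_cases hc1 : w - (s.length : Int) ≤ ((PySem.Chars.splitOn s [' ']).length : Int) - 1
        ∧ w - (s.length : Int) ≠ 0
    · rw [if_pos hc1]
      have hneg : w - (s.length : Int) < 0 := by
        rcases hg with h | h
        · rcases hc1 with ⟨ha, hb⟩
          omega
        · exact absurd h hc1.2
      have hone : (s.splitOn ' ').length = 1 := by
        rcases hg with h | h
        · rw [pv_splitOn_eq] at h
          omega
        · exact absurd h hc1.2
      rw [pv_splitOnMax_neg s _ hneg, pv_splitOn_eq, pv_splitOn_len_one s hone]
      exact PySem.Chars.join_singleton _ _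
    · rw [if_neg hc1, if_pos hg]
  · rw [if_neg hg]
    push Not at hg
    by_cases h3 : ((PySem.Chars.splitOn s [' ']).length : Int) - 1 < w - (s.length : Int)
    · have hc1 : ¬ (w - (s.length : Int) ≤ ((PySem.Chars.splitOn s [' ']).length : Int) - 1
          ∧ w - (s.length : Int) ≠ 0) := by
        rintro ⟨ha, -⟩
        omega
      rw [if_neg hc1, if_neg (by push Not; exact hg), if_pos h3]
      rw [pv_buildSpaces_run]
      set gaps : Int := ((PySem.Chars.splitOn s [' ']).length : Int) - 1 with hgapsd
      set need : Int := w - (s.length : Int) with hneedd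
      set q : Int := PySem.Int.floordiv need gaps with hqd
      set r : Int := PySem.Int.mod need gaps with hrd
      obtain ⟨hq1, hr0, hrlt, hdm⟩ := pv_fdiv_facts need gaps (by omega) h3
      rw [← hqd, ← hrd] at hdm
      rw [← hrd] at hr0 hrlt
      set k : Nat := (q + 1).toNat with hkd
      have hk1 : 1 ≤ k := by omega
      set NS : List Char := PySem.Chars.join (List.replicate k ' ') (PySem.Chars.splitOn s [' ']) with hNSd
      have hsplen : ((s.splitOn ' ').length : Int) = ((PySem.Chars.splitOn s [' ']).length : Int) := by
        rw [pv_splitOn_eq]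
      have hsp1 : 1 ≤ (s.splitOn ' ').length := by omega
      have ecast : (((k - 1) * ((s.splitOn ' ').length - 1) : Nat) : Int) = gaps * q := by
        push_cast [Nat.cast_sub hk1, Nat.cast_sub hsp1]
        have e1 : (k : Int) = q + 1 := by omega
        rw [e1, hgapsd, ← hsplen]
        ring
      have hNSlen : NS.length = s.length + (k - 1) * ((s.splitOn ' ').length - 1) := pv_NS_len s k hk1
      have hlenNS : (NS.length : Int) = (s.length : Int) + gaps * q := by
        rw [hNSlen, Nat.cast_add, ecast]
      have hrq : w - (NS.length : Int) = r := by
        rw [hlenNS]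
        omega
      have hp0 : (PySem.Chars.splitOn NS [' ']).length = k * ((s.splitOn ' ').length - 1) + 1 :=
        pv_NS_pieces s k
      have hpieces : ((PySem.Chars.splitOn NS [' ']).length : Int) - 1 = (k : Int) * gaps := by
        rw [hp0, Nat.cast_add, Nat.cast_mul, Nat.cast_sub hsp1, hgapsd, ← hsplen]
        push_cast
        ring
      have hfe : need.toNat = (need.toNat - 1) + 1 := by omega
      rw [hfe]
      simp only [add_space_from_left_go]
      by_cases hr00 : r = 0
      · have hcA1 : ¬ (w - (NS.length : Int) ≤ ((PySem.Chars.splitOn NS [' ']).length : Int) - 1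
            ∧ w - (NS.length : Int) ≠ 0) := by
          rintro ⟨-, hb⟩
          omega
        rw [if_neg hcA1, if_pos (Or.inr (by omega))]
        rw [hr00, pv_splitOnMax_zero, PySem.Chars.join_singleton]
      · have hkg : gaps ≤ (k : Int) * gaps := le_mul_of_one_le_left (by omega) (by omega)
        have hcA1 : w - (NS.length : Int) ≤ ((PySem.Chars.splitOn NS [' ']).length : Int) - 1
            ∧ w - (NS.length : Int) ≠ 0 := by
          constructor
          · rw [hrq, hpieces]
            omega
          · rw [hrq]
            exact hr00
        rw [if_pos hcA1, hrq]
    · have hc1 : w - (s.length : Int) ≤ ((PySem.Chars.splitOn s [' ']).length : Int) - 1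
          ∧ w - (s.length : Int) ≠ 0 := ⟨by omega, hg.2⟩
      have hgB : ¬ (((PySem.Chars.splitOn s [' ']).length : Int) - 1 = 0 ∨ w - (s.length : Int) = 0) := by
        push Not
        exact hg
      rw [if_pos hc1, if_neg hgB, if_neg h3]

-- ===== VERDICT (by name: the statement is the Claim_ definition above) =====
theorem add_space_from_left_spec : Claim_equal_add_space_from_left := by
  intro S w _
  unfold Spec_add_space_from_left add_space_from_left add_space_from_left_alt
  rw [pv_chars_eq]
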